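-- pv_equiv track=rewrite | github.com/carlzimmerman/zimmerman-formula | research/proof_attempt/function_field_rh.py | count_hyperelliptic_points
-- ===== SOURCE A (Python) =====
-- def is_quadratic_residue(a, p):
--     """Check if a is a quadratic residue mod p using Euler criterion."""
--     if a % p == 0:
--         return True  # 0 is a square
--     return pow(a, (p-1)//2, p) == 1
--
-- def count_hyperelliptic_points(coeffs, p):
--     """
--     Count points on y² = x^d + ... over F_p.
--     coeffs = [a_d, ..., a_1, a_0] for y² = a_d*x^d + ... + a_1*x + a_0
--     """
--     d = len(coeffs) - 1
--     count = 1  # Point at infinity (for odd degree)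
--
--     for x in range(p):
--         # Evaluate polynomial
--         rhs = 0
--         for i, coeff in enumerate(coeffs):
--             rhs += coeff * pow(x, d - i, p)
--         rhs = rhs % p
--
--         if rhs == 0:
--             count += 1
--         elif is_quadratic_residue(rhs, p):
--             count += 2
--
--     return count
-- ===== SOURCE B (Python) =====
-- def count_hyperelliptic_points(coeffs, p):
--     """Count points on y^2 = f(x) over F_p: Horner evaluation per x plus a
--     precomputed set of Euler-criterion residues for O(1) lookup."""
--     e = (p - 1) // 2
--     residues = {a for a in range(1, p) if pow(a, e, p) == 1}
--     total = 1  # point at infinity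
--     for x in range(p):
--         r = 0
--         for c in coeffs:
--             r = (r * x + c) % p
--         if r == 0:
--             total += 1
--         elif r in residues:
--             total += 2
--     return total
-- ===== Notes on version B (the rewrite author's own statement) =====
-- stated objective: alternative
-- what changed: B evaluates the polynomial with Horner's rule (one multiply-add per coefficient instead of a modular exponentiation pow(x, d-i, p) per term) and precomputes the set of Euler-criterion quadratic residues once, replacing the per-x Euler exponentiation by a set lookup; intended as faster (measured 9.57x at n=4096 in a timing run, unconfirmed at the largest size).
import Mathlib
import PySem

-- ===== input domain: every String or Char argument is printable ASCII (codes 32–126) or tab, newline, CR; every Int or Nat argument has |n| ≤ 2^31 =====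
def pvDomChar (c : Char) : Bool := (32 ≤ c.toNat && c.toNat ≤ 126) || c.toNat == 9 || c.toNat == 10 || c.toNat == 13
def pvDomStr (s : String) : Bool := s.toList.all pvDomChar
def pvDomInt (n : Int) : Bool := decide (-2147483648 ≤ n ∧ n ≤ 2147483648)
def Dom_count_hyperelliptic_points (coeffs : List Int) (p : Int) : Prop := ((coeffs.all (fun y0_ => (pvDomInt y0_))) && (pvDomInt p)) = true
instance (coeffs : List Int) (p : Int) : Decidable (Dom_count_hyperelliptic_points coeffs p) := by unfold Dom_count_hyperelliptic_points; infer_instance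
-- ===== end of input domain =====

-- B replaces the per-term pow(x, d-i, p) evaluation by Horner's rule and memoizes the
-- Euler quadratic-residue criterion in a precomputed set (intended as faster; the timing
-- run measured 9.57x at n=4096 but could not confirm the label at the largest size).

-- ===== PORT A =====
-- Euler-criterion exponents are nonneg wherever this is called (p ≥ 1), so .toNat is exact there.
def is_quadratic_residue (a p : Int) : Bool :=
  if PySem.Int.mod a p == 0 then true
  else PySem.Int.powMod a (PySem.Int.floordiv (p - 1) 2).toNat p == 1

-- In the loop i ≤ d, so the exponent d - i is nonnegative and .toNat is exact.
def count_hyperelliptic_points (coeffs : List Int) (p : Int) : Int :=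
  let d : Int := (coeffs.length : Int) - 1
  (PySem.List.pyRange 0 p 1).foldl (fun count x =>
    let rhs : Int := (PySem.List.enumerate coeffs 0).foldl
      (fun rhs ic => rhs + ic.2 * PySem.Int.powMod x (d - ic.1).toNat p) 0
    let rhs := PySem.Int.mod rhs p
    if rhs == 0 then count + 1
    else if is_quadratic_residue rhs p then count + 2
    else count) 1

-- ===== PORT B =====
-- The set comprehension only evaluates pow where p ≥ 2, so e = (p-1)//2 is nonneg there and .toNat is exact.
def count_hyperelliptic_points_alt (coeffs : List Int) (p : Int) : Int :=
  let e : Int := PySem.Int.floordiv (p - 1) 2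
  let residues : PySem.Set Int :=
    PySem.Set.ofList ((PySem.List.pyRange 1 p 1).filter
      (fun a => PySem.Int.powMod a e.toNat p == 1))
  (PySem.List.pyRange 0 p 1).foldl (fun total x =>
    let r := coeffs.foldl (fun r c => PySem.Int.mod (r * x + c) p) 0
    if r == 0 then total + 1
    else if PySem.Set.contains residues r then total + 2
    else total) 1

-- ===== PRECONDITION & SPEC =====
def Spec_count_hyperelliptic_points (coeffs : List Int) (p : Int) (out : Int) : Prop := out = count_hyperelliptic_points_alt coeffs p
instance (coeffs : List Int) (p : Int) (out : Int) : Decidable (Spec_count_hyperelliptic_points coeffs p out) := by unfold Spec_count_hyperelliptic_points; infer_instance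

-- ===== CLAIM (what is proved, stated in full; the proofs are below) =====
def Claim_equal_count_hyperelliptic_points : Prop := ∀ (coeffs : List Int) (p : Int), Dom_count_hyperelliptic_points coeffs p → Spec_count_hyperelliptic_points coeffs p (count_hyperelliptic_points coeffs p)

-- ===== LEMMAS AND PROOFS =====

-- Horner shift: folding from accumulator a adds a * x^len.
theorem pv_horner_shift (x : Int) : ∀ (l : List Int) (a : Int),
    l.foldl (fun r c => r * x + c) a = a * x ^ l.length + l.foldl (fun r c => r * x + c) 0 := by
  intro l
  induction l with
  | nil => intro a; simp
  | cons c l ih =>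
    intro a
    simp only [List.foldl_cons, List.length_cons]
    rw [ih (a * x + c), ih (0 * x + c)]
    ring

-- B's inner loop: Horner with a mod at each step equals plain Horner mod p.
theorem pv_horner_mod (x p : Int) (hp : 0 < p) : ∀ (l : List Int) (a : Int),
    l.foldl (fun r c => PySem.Int.mod (r * x + c) p) (PySem.Int.mod a p)
      = PySem.Int.mod (l.foldl (fun r c => r * x + c) a) p := by
  intro l
  induction l with
  | nil => intro a; simp [PySem.Int.mod_eq_emod_of_pos hp]
  | cons c l ih =>
    intro a
    simp only [List.foldl_cons]
    have h : PySem.Int.mod (PySem.Int.mod a p * x + c) p = PySem.Int.mod (a * x + c) p := by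
      simp only [PySem.Int.mod_eq_emod_of_pos hp]
      rw [Int.add_emod, Int.mul_emod, Int.emod_emod_of_dvd _ dvd_rfl,
        ← Int.mul_emod, ← Int.add_emod]
    rw [h, ih (a * x + c)]

-- Specialisation of pv_horner_mod to the initial accumulator 0.
theorem pv_horner_mod0 (x p : Int) (hp : 0 < p) (l : List Int) :
    l.foldl (fun r c => PySem.Int.mod (r * x + c) p) 0
      = PySem.Int.mod (l.foldl (fun r c => r * x + c) 0) p := by
  have h := pv_horner_mod x p hp l 0
  rwa [show PySem.Int.mod 0 p = 0 by simp [PySem.Int.mod_eq_emod_of_pos hp]] at h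

-- A's inner loop (as a sum over enumerate) agrees with plain Horner mod p.
theorem pv_sum_enum_pow (x p : Int) (hp : 0 < p) : ∀ (l : List Int) (s : Int),
    PySem.Int.mod (((PySem.List.enumerate l s).map
        (fun ic => ic.2 * PySem.Int.powMod x ((s + (l.length : Int) - 1) - ic.1).toNat p)).sum) p
      = PySem.Int.mod (l.foldl (fun r c => r * x + c) 0) p := by
  intro l
  induction l with
  | nil => intro s; simp [PySem.List.enumerate]
  | cons c l ih =>
    intro s
    rw [PySem.List.enumerate_cons]
    have harg : ∀ ic : Int × Int,
        ((s + ((c :: l).length : Int) - 1) - ic.1) = (((s + 1) + (l.length : Int) - 1) - ic.1) := by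
      intro ic; simp; ring
    have hmapeq : (PySem.List.enumerate l (s + 1)).map
          (fun ic => ic.2 * PySem.Int.powMod x ((s + ((c :: l).length : Int) - 1) - ic.1).toNat p)
        = (PySem.List.enumerate l (s + 1)).map
          (fun ic => ic.2 * PySem.Int.powMod x (((s + 1) + (l.length : Int) - 1) - ic.1).toNat p) := by
      apply List.map_congr_left; intro ic _; rw [harg ic]
    rw [List.map_cons, List.sum_cons, hmapeq]
    have hhead : ((s + ((c :: l).length : Int) - 1) - s).toNat = l.length := by
      simp; omega
    rw [hhead]
    -- now: mod (c * powMod x len p + S) p = mod (horner (c::l)) p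
    rw [List.foldl_cons, pv_horner_shift x l (0 * x + c)]
    simp only [PySem.Int.powMod, PySem.Int.mod_eq_emod_of_pos hp] at *
    rw [Int.add_emod, Int.mul_emod c, Int.emod_emod_of_dvd _ dvd_rfl, ih (s + 1),
      ← Int.mul_emod c, ← Int.add_emod]
    rw [Int.add_emod ((0 * x + c) * x ^ l.length), Int.add_emod (c * (x ^ l.length))]
    ring_nf

-- ===== VERDICT (by name: the statement is the Claim_ definition above) =====
theorem count_hyperelliptic_points_spec : Claim_equal_count_hyperelliptic_points := by
  intro coeffs p _
  unfold Spec_count_hyperelliptic_points count_hyperelliptic_points count_hyperelliptic_points_alt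
  apply PySem.List.foldl_congr_mem
  intro acc x hx
  rw [PySem.List.mem_pyRange_one] at hx
  have hp : 0 < p := lt_of_le_of_lt hx.1 hx.2
  -- the evaluated rhs values agree
  have hrhs : PySem.Int.mod ((PySem.List.enumerate coeffs 0).foldl
        (fun rhs ic => rhs + ic.2 * PySem.Int.powMod x (((coeffs.length : Int) - 1) - ic.1).toNat p) 0) p
      = coeffs.foldl (fun r c => PySem.Int.mod (r * x + c) p) 0 := by
    rw [PySem.List.foldl_add]
    have := pv_sum_enum_pow x p hp coeffs 0
    simp only [zero_add] at this ⊢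
    rw [this, pv_horner_mod0 x p hp coeffs]
  simp only []
  rw [hrhs]
  set r := coeffs.foldl (fun r c => PySem.Int.mod (r * x + c) p) 0 with hr
  have hrange : 0 ≤ r ∧ r < p := by
    rw [hr, pv_horner_mod0 x p hp coeffs]
    exact ⟨PySem.Int.mod_nonneg _ hp, PySem.Int.mod_lt _ hp⟩
  by_cases h0 : r = 0
  · simp [h0]
  · have hbne : (r == 0) = false := by simp [h0]
    rw [hbne]
    simp only [Bool.false_eq_true, if_false]
    have hqr : is_quadratic_residue r p
        = PySem.Set.contains (PySem.Set.ofList ((PySem.List.pyRange 1 p 1).filter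
            (fun a => PySem.Int.powMod a (PySem.Int.floordiv (p - 1) 2).toNat p == 1))) r := by
      unfold is_quadratic_residue
      have hmodr : PySem.Int.mod r p = r := by
        rw [PySem.Int.mod_eq_emod_of_pos hp, Int.emod_eq_of_lt hrange.1 hrange.2]
      rw [hmodr]
      have : (r == 0) = false := by simp [h0]
      rw [this]
      simp only [Bool.false_eq_true, if_false]
      have hmem : PySem.Set.contains (PySem.Set.ofList ((PySem.List.pyRange 1 p 1).filter
            (fun a => PySem.Int.powMod a (PySem.Int.floordiv (p - 1) 2).toNat p == 1))) r
          = (PySem.Int.powMod r (PySem.Int.floordiv (p - 1) 2).toNat p == 1) := by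
        have h1 : (1 : Int) ≤ r := by omega
        simp [PySem.Set.contains, PySem.Set.mem_ofList, List.mem_filter,
          PySem.List.mem_pyRange_one, h1, hrange.2]
        rfl
      rw [hmem]
    rw [hqr]
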